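-- pv_equiv track=rewrite | github.com/imaanb/Natcomp | experiment.py | longest_surviving_cell_age
-- ===== SOURCE A (Python) =====
-- def longest_surviving_cell_age(states):
--     """Return the age of the longest surviving cell in each state"""
--     ages = [0] * len(states[0])
--     results = [0]
--     for prev_state, state in zip(states, states[1:]):
--         for i, (prev_cell, cell) in enumerate(zip(prev_state, state)):
--             if prev_cell == cell:
--                 ages[i] += 1
--             else:
--                 ages[i] = 0
--         results.append(max(ages))
--         assert max(ages) >= 0
--     return results
-- ===== SOURCE B (Python) =====
-- def longest_surviving_cell_age(states):
--     """Return the age of the longest surviving cell in each state"""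
--     n = len(states[0])
--     pairs = list(zip(states, states[1:]))
--     cols = []
--     for i in range(n):
--         a = 0
--         col = []
--         for prev, cur in pairs:
--             a = a + 1 if prev[i] == cur[i] else 0
--             col.append(a)
--         cols.append(col)
--     results = [0]
--     for t in range(len(pairs)):
--         results.append(max(col[t] for col in cols))
--     return results
-- ===== Notes on version B (the rewrite author's own statement) =====
-- stated objective: alternative
-- what changed: Reversed the loop nesting: B iterates cell positions in the outer loop, building a per-position age series across all transitions, then takes per-transition maxima; Pre_ excludes ragged grids (rows of unequal length), where A's zip-truncation silently freezes stale ages, and grids whose rows are empty with two or more states, where A raises ValueError.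
-- outside the precondition, e.g. on longest_surviving_cell_age([[1, 2], [1]]): A returns [0, 1], B raises IndexError; on longest_surviving_cell_age([[1, 2], [1, 3], [1]]): A returns [0, 1, 2], B raises IndexError
import Mathlib
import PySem

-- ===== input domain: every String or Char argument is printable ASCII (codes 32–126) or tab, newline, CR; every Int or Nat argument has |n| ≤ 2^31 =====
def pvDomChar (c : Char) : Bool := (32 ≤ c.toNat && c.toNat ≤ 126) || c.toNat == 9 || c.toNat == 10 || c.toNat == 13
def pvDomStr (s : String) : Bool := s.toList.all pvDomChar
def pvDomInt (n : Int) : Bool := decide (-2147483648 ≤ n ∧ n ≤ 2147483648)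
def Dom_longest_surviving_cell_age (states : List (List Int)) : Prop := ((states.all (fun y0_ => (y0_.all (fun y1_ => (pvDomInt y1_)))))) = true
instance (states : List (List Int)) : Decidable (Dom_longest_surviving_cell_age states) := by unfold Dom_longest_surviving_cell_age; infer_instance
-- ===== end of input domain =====

-- B reverses A's loop nesting: position-outer per-cell age series, then per-transition maxima (alternative decomposition, same cost).
-- ===== PORT A =====
-- inner loop: for i,(prev_cell,cell) in enumerate(zip(prev_state,state)): ages[i] = ...
def pvInnerA (ages : List Int) (j : Nat) : List (Int × Int) → List Int
  | [] => ages
  | (pv, cv) :: rest =>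
      pvInnerA (ages.set j (if pv = cv then ages.getD j 0 + 1 else 0)) (j + 1) rest

-- outer loop: for prev_state, state in zip(states, states[1:]): ... results.append(max(ages))
def pvOuterA (ages results : List Int) : List (List Int × List Int) → List Int
  | [] => results
  | (prev, cur) :: rest =>
      let ages' := pvInnerA ages 0 (prev.zip cur)
      pvOuterA ages' (results ++ [(PySem.List.max? ages' (fun x => x)).getD 0]) rest

def longest_surviving_cell_age (states : List (List Int)) : List Int :=
  let ages := List.replicate (states.headD []).length 0
  pvOuterA ages [0] (states.zip states.tail)

-- ===== PORT B =====
-- per-position age series: one value per transition, carrying running age a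
def pvColB (i : Nat) (a : Int) : List (List Int × List Int) → List Int
  | [] => []
  | (prev, cur) :: rest =>
      let a' := if prev.getD i 0 = cur.getD i 0 then a + 1 else 0
      a' :: pvColB i a' rest

def longest_surviving_cell_age_alt (states : List (List Int)) : List Int :=
  let n := (states.headD []).length
  let pairs := states.zip states.tail
  let cols := (List.range n).map (fun i => pvColB i 0 pairs)
  0 :: (List.range pairs.length).map (fun t =>
    (PySem.List.max? (cols.map (fun col => col.getD t 0)) (fun x => x)).getD 0)

-- ===== PRECONDITION & SPEC =====
-- Pre_ excludes inputs where A raises (the empty list: IndexError; two or more empty rows: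
-- ValueError from max([])), and ragged grids (rows of unequal length), where A's value is an
-- accident of zip truncation silently freezing stale age entries; B raises IndexError there.
def Pre_longest_surviving_cell_age (states : List (List Int)) : Prop :=
  states ≠ [] ∧
  (∀ row ∈ states, row.length = (states.headD []).length) ∧
  (states.length = 1 ∨ (states.headD []).length ≠ 0)
instance (states : List (List Int)) : Decidable (Pre_longest_surviving_cell_age states) := by
  unfold Pre_longest_surviving_cell_age; infer_instance
def pvWitness_longest_surviving_cell_age : List (List Int) := [[1, 2], [1, 3], [1, 3]]

def Spec_longest_surviving_cell_age (states : List (List Int)) (out : List Int) : Prop := out = longest_surviving_cell_age_alt states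
instance (states : List (List Int)) (out : List Int) : Decidable (Spec_longest_surviving_cell_age states out) := by unfold Spec_longest_surviving_cell_age; infer_instance

-- ===== CLAIM (what is proved, stated in full; the proofs are below) =====
def Claim_equal_longest_surviving_cell_age : Prop := ∀ (states : List (List Int)), Dom_longest_surviving_cell_age states → Pre_longest_surviving_cell_age states → Spec_longest_surviving_cell_age states (longest_surviving_cell_age states)

-- ===== LEMMAS AND PROOFS =====

theorem pvInnerA_length (ps : List (Int × Int)) : ∀ (j : Nat) (ages : List Int),
    (pvInnerA ages j ps).length = ages.length := by
  induction ps with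
  | nil => intro j ages; simp [pvInnerA]
  | cons hd tl ih =>
      intro j ages
      obtain ⟨pv, cv⟩ := hd
      simp [pvInnerA, ih]

theorem pvInnerA_getD (ps : List (Int × Int)) : ∀ (j : Nat) (ages : List Int),
    j + ps.length ≤ ages.length → ∀ i : Nat,
    (pvInnerA ages j ps).getD i 0 =
      if j ≤ i ∧ i - j < ps.length then
        (if (ps.getD (i - j) (0, 0)).1 = (ps.getD (i - j) (0, 0)).2 then ages.getD i 0 + 1 else 0)
      else ages.getD i 0 := by
  induction ps with
  | nil => intro j ages _ i; simp [pvInnerA]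
  | cons hd tl ih =>
      intro j ages hlen i
      obtain ⟨pv, cv⟩ := hd
      simp only [List.length_cons] at hlen
      have hj : j < ages.length := by omega
      rw [pvInnerA, ih (j + 1) _ (by simp only [List.length_set]; omega) i]
      by_cases hij : i = j
      · subst hij
        have h1 : ¬ (i + 1 ≤ i ∧ i - (i + 1) < tl.length) := by omega
        rw [if_neg h1,
            if_pos (c := i ≤ i ∧ i - i < ((pv, cv) :: tl).length)
              (by simp only [List.length_cons]; omega)]
        simp only [Nat.sub_self, List.getD_cons_zero]
        have h2 : (ages.set i (if pv = cv then ages.getD i 0 + 1 else 0)).getD i 0 =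
            (if pv = cv then ages.getD i 0 + 1 else 0) := by
          rw [List.getD_eq_getElem _ _ (by simpa using hj)]
          exact List.getElem_set_self _
        rw [h2]
      · have hgd : (ages.set j (if pv = cv then ages.getD j 0 + 1 else 0)).getD i 0 = ages.getD i 0 := by
          simp [List.getD, List.getElem?_set_ne (by omega : j ≠ i)]
        rw [hgd]
        by_cases hc : j + 1 ≤ i ∧ i - (j + 1) < tl.length
        · rw [if_pos hc,
              if_pos (c := j ≤ i ∧ i - j < ((pv, cv) :: tl).length)
                (by simp only [List.length_cons]; omega)]
          have he : i - j = (i - (j + 1)) + 1 := by omega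
          rw [he, List.getD_cons_succ]
        · rw [if_neg hc,
              if_neg (c := j ≤ i ∧ i - j < ((pv, cv) :: tl).length)
                (by simp only [List.length_cons]; omega)]

theorem map_range_getD (l : List Int) : (List.range l.length).map (fun i => l.getD i 0) = l := by
  apply List.ext_getElem
  · simp
  · intro i h1 h2
    simp [List.getD, List.getElem?_eq_getElem h2]

theorem pvOuterA_eq (n : Nat) :
    ∀ (pairs : List (List Int × List Int)) (ages results : List Int),
    ages.length = n →
    (∀ pr ∈ pairs, pr.1.length = n ∧ pr.2.length = n) →
    pvOuterA ages results pairs =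
      results ++ (List.range pairs.length).map (fun t =>
        (PySem.List.max? ((List.range n).map
          (fun i => (pvColB i (ages.getD i 0) pairs).getD t 0)) (fun x => x)).getD 0) := by
  intro pairs
  induction pairs with
  | nil => intro ages results _ _; simp [pvOuterA]
  | cons hd tl ih =>
      intro ages results hlen hrect
      obtain ⟨prev, cur⟩ := hd
      obtain ⟨hp, hc⟩ := hrect (prev, cur) (by simp)
      set v := fun i : Nat => if prev.getD i 0 = cur.getD i 0 then ages.getD i 0 + 1 else 0 with hv
      have hzlen : (prev.zip cur).length = n := by simp [hp, hc]
      have hages' : ∀ i : Nat, i < n → (pvInnerA ages 0 (prev.zip cur)).getD i 0 = v i := by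
        intro i hi
        rw [pvInnerA_getD (prev.zip cur) 0 ages (by omega) i]
        have hzip : (prev.zip cur).getD (i - 0) (0, 0) = (prev.getD i 0, cur.getD i 0) := by
          simp only [Nat.sub_zero]
          have hip : i < prev.length := by rw [hp]; exact hi
          have hic : i < cur.length := by rw [hc]; exact hi
          rw [List.getD_eq_getElem _ _ (by rw [hzlen]; exact hi), List.getD_eq_getElem _ _ hip,
              List.getD_eq_getElem _ _ hic, List.getElem_zip]
        rw [if_pos (c := 0 ≤ i ∧ i - 0 < (prev.zip cur).length)
              (by simp only [hzlen]; omega), hzip]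
      have hlen' : (pvInnerA ages 0 (prev.zip cur)).length = n := by
        rw [pvInnerA_length]; exact hlen
      have hcol : ∀ i : Nat, pvColB i (ages.getD i 0) ((prev, cur) :: tl) =
          v i :: pvColB i (v i) tl := by
        intro i; rw [pvColB]
      rw [pvOuterA]
      rw [ih (pvInnerA ages 0 (prev.zip cur)) _ hlen'
            (fun pr hpr => hrect pr (by simp [hpr]))]
      rw [List.append_assoc, List.singleton_append]
      simp only [List.length_cons]
      rw [List.range_succ_eq_map, List.map_cons, List.map_map]
      have hmax : (PySem.List.max? (pvInnerA ages 0 (prev.zip cur)) (fun x => x)).getD 0 =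
          (PySem.List.max? ((List.range n).map (fun i => v i)) (fun x => x)).getD 0 := by
        have h3 : (List.range n).map (fun i => v i) = pvInnerA ages 0 (prev.zip cur) := by
          have h2 := map_range_getD (pvInnerA ages 0 (prev.zip cur))
          rw [hlen'] at h2
          rw [← h2]
          exact List.map_congr_left (fun i hi => (hages' i (by simpa using hi)).symm)
        rw [h3]
      congr 1
      beta_reduce
      refine congrArg₂ List.cons ?_ ?_
      · rw [hmax]
        congr 2
      · refine List.map_congr_left ?_
        intro t _
        simp only [Function.comp_apply]
        congr 2
        refine List.map_congr_left ?_
        intro i hi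
        rw [hcol i, hages' i (by simpa using hi)]
        rfl

theorem longest_surviving_cell_age_main (states : List (List Int))
    (hpre : Pre_longest_surviving_cell_age states) :
    longest_surviving_cell_age states = longest_surviving_cell_age_alt states := by
  obtain ⟨hne, hrect, _⟩ := hpre
  match states with
  | [] => exact absurd rfl hne
  | s1 :: rest =>
      simp only [List.headD_cons] at hrect
      unfold longest_surviving_cell_age longest_surviving_cell_age_alt
      simp only [List.headD_cons, List.tail_cons]
      have hpairs : ∀ pr ∈ (s1 :: rest).zip rest, pr.1.length = s1.length ∧ pr.2.length = s1.length := by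
        intro pr hpr
        have h1 := List.of_mem_zip hpr
        exact ⟨hrect pr.1 h1.1, hrect pr.2 (List.mem_cons_of_mem _ h1.2)⟩
      rw [pvOuterA_eq s1.length _ _ _ (by simp) hpairs]
      simp only [List.singleton_append, List.map_map]
      congr 1
      apply List.map_congr_left
      intro t _
      congr 2
      apply List.map_congr_left
      intro i hi
      have : (List.replicate s1.length (0 : Int)).getD i 0 = 0 := by
        simp [List.getD, List.getElem?_replicate]
        split <;> rfl
      rw [this]
      rfl

-- ===== VERDICT (by name: the statement is the Claim_ definition above) =====
theorem longest_surviving_cell_age_spec : Claim_equal_longest_surviving_cell_age := by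
  intro states _ hpre
  exact longest_surviving_cell_age_main states hpre
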